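-- pv_equiv track=rewrite | github.com/steve1316/warhammer3-modding | helper_scripts/check_translations.py | process_key_differences
-- ===== SOURCE A (Python) =====
-- from typing import List
--
-- def process_key_differences(diff_keys: List[str], mod_name: str, table_name: str, messages: List[str], explanation: str, is_missing_in_translation: bool):
--     """Process key differences between original and translation data.
--
--     Handles two types of discrepancies:
--     - Keys present in original but missing in translation.
--     - Extra keys present in translation but missing in original.
--
--     Args:
--         diff_keys (List[str]): List of keys that differ between versions.
--         mod_name (str): Name of the mod being checked (for error reporting).
--         table_name (str): Name of the table being checked.
--         messages (List[str]): List to accumulate validation messages.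
--         explanation (str): Context message about the key difference origin.
--         is_missing_in_translation (bool): Flag indicating direction of mismatch (True = missing in translation).
--
--     Returns:
--         Tuple of (updated_messages, collected_keys) where updated_messages is the updated list of messages
--         and collected_keys is a set of keys that had issues.
--     """
--     collected_keys = set()
--     for key in diff_keys:
--         # Skip automatic update keys by mod authors that don't require translation.
--         if key.lower() in ["update", "land_units_onscreen_name_update"]:
--             continue
--         elif "steamapps/workshop/" in key:
--             continue
--         elif "----" in key:
--             continue
--
--         collected_keys.add(key)
--
--         # Ensure mod name and explanation are only added once per discrepancy group.
--         if f"Mod name: {mod_name}" not in messages: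
--             messages.append("//////////////////////////////////////////////////")
--             messages.append(f"Mod name: {mod_name}")
--             messages.append(f"Table name: {table_name}")
--         if explanation not in messages:
--             messages.append(explanation)
--
--         # Create appropriate message based on discrepancy direction.
--         if is_missing_in_translation:
--             message = f"\"{key}\" is in the original but not in the translation."
--         else:
--             message = f"\"{key}\" is in the translation but not in the original."
--
--         messages.append(message)
--     return messages, collected_keys
-- ===== SOURCE B (Python) =====
-- def process_key_differences(diff_keys, mod_name, table_name, messages, explanation, is_missing_in_translation):
--     def keep(key):
--         return (key.lower() not in ("update", "land_units_onscreen_name_update")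
--                 and "steamapps/workshop/" not in key
--                 and "----" not in key)
--
--     survivors = [k for k in diff_keys if keep(k)]
--     collected_keys = set(survivors)
--
--     if survivors:
--         if f"Mod name: {mod_name}" not in messages:
--             messages.append("//////////////////////////////////////////////////")
--             messages.append(f"Mod name: {mod_name}")
--             messages.append(f"Table name: {table_name}")
--         if explanation not in messages:
--             messages.append(explanation)
--
--     suffix = (" is in the original but not in the translation."
--               if is_missing_in_translation
--               else " is in the translation but not in the original.")
--     messages.extend(f'"{key}"' + suffix for key in survivors)
--     return messages, collected_keys
-- ===== Notes on version B (the rewrite author's own statement) =====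
-- stated objective: faster
-- what changed: A interleaves the skip guards, repeated 'not in messages' membership scans and message building inside one loop; B filters the surviving keys once, performs the header/explanation membership checks at most once outside any loop, and emits all per-key messages in a single extend with a precomputed suffix.
import Mathlib
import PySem

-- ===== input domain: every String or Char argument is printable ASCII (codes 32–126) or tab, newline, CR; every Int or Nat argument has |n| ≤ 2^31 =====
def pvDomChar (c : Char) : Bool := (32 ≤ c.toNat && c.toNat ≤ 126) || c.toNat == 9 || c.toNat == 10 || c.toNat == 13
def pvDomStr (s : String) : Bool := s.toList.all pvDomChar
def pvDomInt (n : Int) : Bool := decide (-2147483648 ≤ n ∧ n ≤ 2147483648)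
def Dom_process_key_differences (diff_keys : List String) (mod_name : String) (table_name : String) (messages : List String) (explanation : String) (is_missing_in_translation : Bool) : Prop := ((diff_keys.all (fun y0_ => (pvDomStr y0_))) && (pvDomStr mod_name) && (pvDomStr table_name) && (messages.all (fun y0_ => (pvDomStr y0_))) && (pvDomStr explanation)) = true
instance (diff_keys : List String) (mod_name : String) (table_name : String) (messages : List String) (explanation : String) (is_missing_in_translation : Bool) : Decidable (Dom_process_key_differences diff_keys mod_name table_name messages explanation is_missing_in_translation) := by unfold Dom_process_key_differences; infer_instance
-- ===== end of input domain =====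

-- B replaces A's single guard-laden loop by filter-once / header-once / map-the-messages; same return value (both mutate `messages` in Python the same way).


-- ===== PORT A =====
-- A's loop body, one key at a time over the state (messages, collected_keys).
def pkdStepA (mod_name table_name explanation : String) (is_missing_in_translation : Bool)
    (st : List String × PySem.Set String) (key : String) : List String × PySem.Set String :=
  if PySem.Str.lower key ∈ ["update", "land_units_onscreen_name_update"] then st
  else if PySem.Str.isIn "steamapps/workshop/" key then st
  else if PySem.Str.isIn "----" key then st
  else
    let collected := PySem.Set.add st.2 key
    let m1 := if ("Mod name: " ++ mod_name) ∈ st.1 then st.1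
              else st.1 ++ ["//////////////////////////////////////////////////",
                            "Mod name: " ++ mod_name, "Table name: " ++ table_name]
    let m2 := if explanation ∈ m1 then m1 else m1 ++ [explanation]
    let message := if is_missing_in_translation then
        "\"" ++ key ++ "\" is in the original but not in the translation."
      else
        "\"" ++ key ++ "\" is in the translation but not in the original."
    (m2 ++ [message], collected)

def process_key_differences (diff_keys : List String) (mod_name : String) (table_name : String) (messages : List String) (explanation : String) (is_missing_in_translation : Bool) : List String × List String :=
  diff_keys.foldl (pkdStepA mod_name table_name explanation is_missing_in_translation)
    (messages, PySem.Set.empty)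

-- ===== PORT B =====
-- B's skip guard (keep = survives all three skips).
def pkdKeep (key : String) : Bool :=
  decide (PySem.Str.lower key ∉ ["update", "land_units_onscreen_name_update"])
    && !PySem.Str.isIn "steamapps/workshop/" key
    && !PySem.Str.isIn "----" key

def process_key_differences_alt (diff_keys : List String) (mod_name : String) (table_name : String) (messages : List String) (explanation : String) (is_missing_in_translation : Bool) : List String × List String :=
  let survivors := diff_keys.filter pkdKeep
  let collected := PySem.Set.ofList survivors
  let msgs :=
    if survivors.isEmpty then messages
    else
      let m := if ("Mod name: " ++ mod_name) ∈ messages then messages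
               else messages ++ ["//////////////////////////////////////////////////",
                                 "Mod name: " ++ mod_name, "Table name: " ++ table_name]
      if explanation ∈ m then m else m ++ [explanation]
  let suffix := if is_missing_in_translation then " is in the original but not in the translation."
                else " is in the translation but not in the original."
  (msgs ++ survivors.map (fun key => "\"" ++ key ++ "\"" ++ suffix), collected)

-- ===== PRECONDITION & SPEC =====
def Spec_process_key_differences (diff_keys : List String) (mod_name : String) (table_name : String) (messages : List String) (explanation : String) (is_missing_in_translation : Bool) (out : List String × List String) : Prop := out = process_key_differences_alt diff_keys mod_name table_name messages explanation is_missing_in_translation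
instance (diff_keys : List String) (mod_name : String) (table_name : String) (messages : List String) (explanation : String) (is_missing_in_translation : Bool) (out : List String × List String) : Decidable (Spec_process_key_differences diff_keys mod_name table_name messages explanation is_missing_in_translation out) := by unfold Spec_process_key_differences; infer_instance

-- ===== CLAIM (what is proved, stated in full; the proofs are below) =====
def Claim_equal_process_key_differences : Prop := ∀ (diff_keys : List String) (mod_name : String) (table_name : String) (messages : List String) (explanation : String) (is_missing_in_translation : Bool), Dom_process_key_differences diff_keys mod_name table_name messages explanation is_missing_in_translation → Spec_process_key_differences diff_keys mod_name table_name messages explanation is_missing_in_translation (process_key_differences diff_keys mod_name table_name messages explanation is_missing_in_translation)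

-- ===== LEMMAS AND PROOFS =====

-- B's per-key message, as appended by B's map.
def pkdMsg (is_missing_in_translation : Bool) (key : String) : String :=
  "\"" ++ key ++ "\""
    ++ (if is_missing_in_translation then " is in the original but not in the translation."
        else " is in the translation but not in the original.")

theorem pkdStepA_skip (mod_name table_name explanation : String) (b : Bool)
    (st : List String × PySem.Set String) (key : String) (h : pkdKeep key = false) :
    pkdStepA mod_name table_name explanation b st key = st := by
  unfold pkdKeep at h
  unfold pkdStepA
  simp only [Bool.and_eq_false_iff, decide_eq_false_iff_not, Bool.not_eq_false', not_not] at h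
  rcases h with (h | h) | h
  · simp [h]
  · simp at h
    simp [h]
  · simp at h
    simp [h]

theorem pkdStepA_keep (mod_name table_name explanation : String) (b : Bool)
    (m : List String) (s : PySem.Set String) (key : String) (h : pkdKeep key = true) :
    pkdStepA mod_name table_name explanation b (m, s) key =
      (let m1 := if ("Mod name: " ++ mod_name) ∈ m then m
                 else m ++ ["//////////////////////////////////////////////////",
                            "Mod name: " ++ mod_name, "Table name: " ++ table_name]
       let m2 := if explanation ∈ m1 then m1 else m1 ++ [explanation]
       (m2 ++ [pkdMsg b key], PySem.Set.add s key)) := by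
  unfold pkdKeep at h
  simp only [Bool.and_eq_true, decide_eq_true_eq, Bool.not_eq_true'] at h
  obtain ⟨⟨h1, h2⟩, h3⟩ := h
  unfold pkdStepA pkdMsg
  simp only [h1, h2, h3, if_false, Bool.false_eq_true]
  cases b <;> simp [String.append_assoc]

-- the loop over survivors once both header line and explanation are present in the messages
theorem pkd_foldl_body (mod_name table_name explanation : String) (b : Bool)
    (ks : List String) (m : List String) (s : PySem.Set String)
    (hk : ∀ k ∈ ks, pkdKeep k = true)
    (hh : ("Mod name: " ++ mod_name) ∈ m) (he : explanation ∈ m) :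
    ks.foldl (pkdStepA mod_name table_name explanation b) (m, s) =
      (m ++ ks.map (pkdMsg b), ks.foldl PySem.Set.add s) := by
  induction ks generalizing m s with
  | nil => simp
  | cons k ks ih =>
      have hkk : pkdKeep k = true := hk k (List.mem_cons_self ..)
      simp only [List.foldl_cons, pkdStepA_keep mod_name table_name explanation b m s k hkk]
      simp only [if_pos hh, if_pos he]
      rw [ih (m ++ [pkdMsg b k]) (PySem.Set.add s k)
        (fun k' hk' => hk k' (List.mem_cons_of_mem _ hk'))
        (List.mem_append_left _ hh) (List.mem_append_left _ he)]
      simp [List.map_cons]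

theorem pkd_foldl_filter (mod_name table_name explanation : String) (b : Bool)
    (l : List String) (st : List String × PySem.Set String) :
    l.foldl (pkdStepA mod_name table_name explanation b) st =
      (l.filter pkdKeep).foldl (pkdStepA mod_name table_name explanation b) st := by
  induction l generalizing st with
  | nil => rfl
  | cons k l ih =>
      by_cases h : pkdKeep k = true
      · simp [h, ih]
      · simp only [Bool.not_eq_true] at h
        simp [h, pkdStepA_skip mod_name table_name explanation b st k h, ih]

-- ===== VERDICT (by name: the statement is the Claim_ definition above) =====
theorem process_key_differences_spec : Claim_equal_process_key_differences := by
  intro diff_keys mod_name table_name messages explanation b _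
  unfold Spec_process_key_differences process_key_differences process_key_differences_alt
  rw [pkd_foldl_filter]
  have hk : ∀ k ∈ diff_keys.filter pkdKeep, pkdKeep k = true :=
    fun k hks => List.of_mem_filter hks
  cases hsurv : diff_keys.filter pkdKeep with
  | nil => simp [PySem.Set.ofList, PySem.Set.empty]
  | cons k ks =>
      rw [hsurv] at hk
      have hkk : pkdKeep k = true := hk k (List.mem_cons_self ..)
      simp only [List.foldl_cons,
        pkdStepA_keep mod_name table_name explanation b messages PySem.Set.empty k hkk]
      set m1 := if ("Mod name: " ++ mod_name) ∈ messages then messages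
                else messages ++ ["//////////////////////////////////////////////////",
                                  "Mod name: " ++ mod_name, "Table name: " ++ table_name] with hm1
      set m2 := if explanation ∈ m1 then m1 else m1 ++ [explanation] with hm2
      have hh : ("Mod name: " ++ mod_name) ∈ m2 := by
        have h1 : ("Mod name: " ++ mod_name) ∈ m1 := by
          rw [hm1]; split_ifs with h
          · exact h
          · simp
        rw [hm2]; split_ifs with h
        · exact h1
        · exact List.mem_append_left _ h1
      have he : explanation ∈ m2 := by
        rw [hm2]; split_ifs with h
        · exact h
        · simp
      rw [pkd_foldl_body mod_name table_name explanation b ks (m2 ++ [pkdMsg b k])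
        (PySem.Set.add PySem.Set.empty k)
        (fun k' hk' => hk k' (List.mem_cons_of_mem _ hk'))
        (List.mem_append_left _ hh) (List.mem_append_left _ he)]
      rw [Prod.mk.injEq]
      refine ⟨?_, ?_⟩
      · simp [pkdMsg, List.map_cons, List.append_assoc]
      · rw [PySem.Set.ofList_eq_foldl, List.foldl_cons]
        rfl
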